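-- pv_equiv track=rewrite | github.com/miseop25/Back_Jun_Code_Study | For_code_Test/N_TECH/test_3.py | solution
-- ===== SOURCE A (Python) =====
-- import collections
--
-- def solution(input):
--     answer = True
--     turn_deq = collections.deque()
--     stack_deq = collections.deque()
--
--     for i in input :
--         if i =='['or i == '{' or i == '(':
--             stack_deq.append(i)
--
--         elif i ==']'or i == '}' or i == ')':
--             try :
--                 buf = ord(stack_deq.pop())
--             except :
--                 return False
--
--
--             if buf == (ord(i)-2) or buf == (ord(i) - 1) :
--                 if i ==']' :
--                     for j in stack_deq :
--                         if j == '(' or j == '{' or j == '[':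
--                             return False
--                 elif i == '}' :
--                     for j in stack_deq :
--                         if j == '(' or j == '{':
--                             return False
--
--
--             else :
--                 return False
--
--     return answer
-- ===== SOURCE B (Python) =====
-- def solution(input):
--     # Incremental counters of open-bracket types on the stack replace the
--     # rescan of the remaining stack on each ']' / '}' close.
--     stack = []
--     n_round = 0   # '(' currently open
--     n_curly = 0   # '{' currently open
--     n_square = 0  # '[' currently open
--     for ch in input:
--         if ch == '(':
--             stack.append(ch)
--             n_round += 1
--         elif ch == '{':
--             stack.append(ch)
--             n_curly += 1
--         elif ch == '[':
--             stack.append(ch)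
--             n_square += 1
--         elif ch == ')':
--             if not stack or stack.pop() != '(':
--                 return False
--             n_round -= 1
--         elif ch == '}':
--             if not stack or stack.pop() != '{':
--                 return False
--             n_curly -= 1
--             if n_round or n_curly:
--                 return False
--         elif ch == ']':
--             if not stack or stack.pop() != '[':
--                 return False
--             n_square -= 1
--             if n_round or n_curly or n_square:
--                 return False
--     return True
-- ===== Notes on version B (the rewrite author's own statement) =====
-- stated objective: alternative
-- what changed: Replaces A's rescan of the whole remaining stack on every ']' / '}' close (and its ord-arithmetic match test) with three incremental counters of currently-open bracket types, so each close is a constant-time counter check.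
import Mathlib
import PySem

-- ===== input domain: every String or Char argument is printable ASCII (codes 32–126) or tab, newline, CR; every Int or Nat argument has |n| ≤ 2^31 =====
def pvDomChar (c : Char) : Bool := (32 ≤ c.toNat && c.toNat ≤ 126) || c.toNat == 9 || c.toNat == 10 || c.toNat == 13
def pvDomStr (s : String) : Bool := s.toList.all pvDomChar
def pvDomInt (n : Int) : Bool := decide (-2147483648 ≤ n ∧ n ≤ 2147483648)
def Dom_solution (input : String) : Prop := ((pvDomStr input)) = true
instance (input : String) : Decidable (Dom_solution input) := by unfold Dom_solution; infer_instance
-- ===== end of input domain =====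

-- B replaces A's per-close rescan of the whole stack with incremental counters of open-bracket types.

-- ===== PORT A =====
-- stack modelled head-first (deque append = cons, pop = head); the inner 'for j in stack_deq'
-- early-return scan becomes List.any (a pure existence check, so iteration direction is immaterial)
def solutionA_go : List Char → List Char → Bool
  | _, [] => true                                   -- loop ends: return answer (= True)
  | stack, i :: rest =>
    if i = '[' ∨ i = '{' ∨ i = '(' then solutionA_go (i :: stack) rest
    else if i = ']' ∨ i = '}' ∨ i = ')' then
      match stack with
      | [] => false                                 -- pop raises IndexError → except → return False
      | buf :: stack' =>
        if buf.toNat = i.toNat - 2 ∨ buf.toNat = i.toNat - 1 then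
          if i = ']' then
            if stack'.any (fun j => j = '(' ∨ j = '{' ∨ j = '[') then false
            else solutionA_go stack' rest
          else if i = '}' then
            if stack'.any (fun j => j = '(' ∨ j = '{') then false
            else solutionA_go stack' rest
          else solutionA_go stack' rest
        else false
    else solutionA_go stack rest

def solution (input : String) : Bool := solutionA_go [] input.toList

-- ===== PORT B =====
def solutionB_go : List Char → Int → Int → Int → List Char → Bool
  | _, _, _, _, [] => true
  | stack, nr, nc, ns, ch :: rest =>
    if ch = '(' then solutionB_go (ch :: stack) (nr + 1) nc ns rest
    else if ch = '{' then solutionB_go (ch :: stack) nr (nc + 1) ns rest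
    else if ch = '[' then solutionB_go (ch :: stack) nr nc (ns + 1) rest
    else if ch = ')' then
      match stack with
      | [] => false
      | top :: stack' =>
        if top ≠ '(' then false else solutionB_go stack' (nr - 1) nc ns rest
    else if ch = '}' then
      match stack with
      | [] => false
      | top :: stack' =>
        if top ≠ '{' then false
        else if nr ≠ 0 ∨ nc - 1 ≠ 0 then false
        else solutionB_go stack' nr (nc - 1) ns rest
    else if ch = ']' then
      match stack with
      | [] => false
      | top :: stack' =>
        if top ≠ '[' then false
        else if nr ≠ 0 ∨ nc ≠ 0 ∨ ns - 1 ≠ 0 then false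
        else solutionB_go stack' nr nc (ns - 1) rest
    else solutionB_go stack nr nc ns rest

def solution_alt (input : String) : Bool := solutionB_go [] 0 0 0 input.toList

-- ===== PRECONDITION & SPEC =====
def Spec_solution (input : String) (out : Bool) : Prop := out = solution_alt input
instance (input : String) (out : Bool) : Decidable (Spec_solution input out) := by unfold Spec_solution; infer_instance

-- ===== CLAIM (what is proved, stated in full; the proofs are below) =====
def Claim_equal_solution : Prop := ∀ (input : String), Dom_solution input → Spec_solution input (solution input)

-- ===== LEMMAS AND PROOFS =====

theorem exists_two (l : List Char) (a b : Char) : (∃ x ∈ l, x = a ∨ x = b) ↔ a ∈ l ∨ b ∈ l := by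
  constructor
  · rintro ⟨x, hx, rfl | rfl⟩
    · exact Or.inl hx
    · exact Or.inr hx
  · rintro (h | h)
    · exact ⟨a, h, Or.inl rfl⟩
    · exact ⟨b, h, Or.inr rfl⟩

theorem exists_three (l : List Char) (a b c : Char) : (∃ x ∈ l, x = a ∨ x = b ∨ x = c) ↔ a ∈ l ∨ b ∈ l ∨ c ∈ l := by
  constructor
  · rintro ⟨x, hx, rfl | rfl | rfl⟩
    · exact Or.inl hx
    · exact Or.inr (Or.inl hx)
    · exact Or.inr (Or.inr hx)
  · rintro (h | h | h)
    · exact ⟨a, h, Or.inl rfl⟩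
    · exact ⟨b, h, Or.inr (Or.inl rfl)⟩
    · exact ⟨c, h, Or.inr (Or.inr rfl)⟩

-- invariant: A's stack holds only open brackets, and B's counters are exactly the
-- multiplicities of each open bracket on the (shared) stack
theorem main_lemma (chars : List Char) : ∀ (stack : List Char),
    (∀ c ∈ stack, c = '(' ∨ c = '{' ∨ c = '[') →
    solutionA_go stack chars =
      solutionB_go stack (stack.count '(' : Int) (stack.count '{' : Int)
        (stack.count '[' : Int) chars := by
  induction chars with
  | nil => intro stack _; rfl
  | cons ch rest ih =>
    intro stack hst
    by_cases hp : ch = '('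
    · subst hp
      have hst2 : ∀ c ∈ '(' :: stack, c = '(' ∨ c = '{' ∨ c = '[' := by
        intro c hc
        rcases List.mem_cons.mp hc with rfl | hc2
        · exact Or.inl rfl
        · exact hst c hc2
      have h := ih ('(' :: stack) hst2
      simp only [List.count_cons] at h
      simp at h
      simp only [solutionA_go, solutionB_go]
      simp
      exact h
    · by_cases hc : ch = '{'
      · subst hc
        have hst2 : ∀ c ∈ '{' :: stack, c = '(' ∨ c = '{' ∨ c = '[' := by
          intro c hc
          rcases List.mem_cons.mp hc with rfl | hc2
          · exact Or.inr (Or.inl rfl)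
          · exact hst c hc2
        have h := ih ('{' :: stack) hst2
        simp only [List.count_cons] at h
        simp at h
        simp only [solutionA_go, solutionB_go]
        simp
        exact h
      · by_cases hs : ch = '['
        · subst hs
          have hst2 : ∀ c ∈ '[' :: stack, c = '(' ∨ c = '{' ∨ c = '[' := by
            intro c hc
            rcases List.mem_cons.mp hc with rfl | hc2
            · exact Or.inr (Or.inr rfl)
            · exact hst c hc2
          have h := ih ('[' :: stack) hst2
          simp only [List.count_cons] at h
          simp at h
          simp only [solutionA_go, solutionB_go]
          simp
          exact h
        · by_cases hp' : ch = ')'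
          · subst hp'
            simp only [solutionA_go, solutionB_go]
            simp
            cases stack with
            | nil => rfl
            | cons buf stack' =>
              have hst' : ∀ c ∈ stack', c = '(' ∨ c = '{' ∨ c = '[' :=
                fun c hc => hst c (List.mem_cons_of_mem _ hc)
              rcases hst buf (by simp) with hb | hb | hb <;> subst hb
              · simp only [List.count_cons]
                simp
                exact ih stack' hst'
              · simp
              · simp
          · by_cases hc' : ch = '}'
            · subst hc'
              simp only [solutionA_go, solutionB_go]
              simp
              cases stack with
              | nil => rfl
              | cons buf stack' =>
                have hst' : ∀ c ∈ stack', c = '(' ∨ c = '{' ∨ c = '[' :=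
                  fun c hc => hst c (List.mem_cons_of_mem _ hc)
                rcases hst buf (by simp) with hb | hb | hb <;> subst hb
                · simp
                · simp only [List.count_cons]
                  by_cases h1 : '(' ∈ stack' <;> by_cases h2 : '{' ∈ stack' <;>
                    simp [exists_two, List.count_eq_zero, h1, h2]
                  exact ih stack' hst'
                · simp
            · by_cases hs' : ch = ']'
              · subst hs'
                simp only [solutionA_go, solutionB_go]
                simp
                cases stack with
                | nil => rfl
                | cons buf stack' =>
                  have hst' : ∀ c ∈ stack', c = '(' ∨ c = '{' ∨ c = '[' :=
                    fun c hc => hst c (List.mem_cons_of_mem _ hc)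
                  rcases hst buf (by simp) with hb | hb | hb <;> subst hb
                  · simp
                  · simp
                  · simp only [List.count_cons]
                    by_cases h1 : '(' ∈ stack' <;> by_cases h2 : '{' ∈ stack' <;> by_cases h3 : '[' ∈ stack' <;>
                      simp [exists_three, List.count_eq_zero, h1, h2, h3]
                    exact ih stack' hst'
              · simp only [solutionA_go, solutionB_go]
                rw [if_neg (by tauto), if_neg (by tauto), if_neg hp, if_neg hc, if_neg hs,
                  if_neg hp', if_neg hc', if_neg hs']
                exact ih stack hst

-- ===== VERDICT (by name: the statement is the Claim_ definition above) =====
theorem solution_spec : Claim_equal_solution := by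
  intro input _
  unfold Spec_solution solution solution_alt
  simpa using main_lemma input.toList [] (by intro c hc; simp at hc)
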